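-- pv_equiv track=rewrite | github.com/swjungle4a-algorithm/algorithm_study | jack/lv3/숫자 게임.py | solution
-- ===== SOURCE A (Python) =====
-- from heapq import heapify, heappop
--
-- def solution(A, B):
--     answer = 0
--     A.sort()
--     heapify(B)
--     for a in A :
--         while B :
--             b = heappop(B)
--             if b > a :
--                 answer += 1
--                 break
--     return answer
-- ===== SOURCE B (Python) =====
-- def solution(A, B):
--     # Hall-defect formula instead of greedy consumption: with A sorted ascending,
--     # answer = min(n, min_i (i + #{b in B : b > A[i]})), computed by a backward
--     # min-fold; the count uses a hand-rolled binary search on sorted(B).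
--     # Side effects differ: the original heapifies and partially empties B, here B
--     # is untouched (A is sorted in place in both); the claim is about the return value.
--     A.sort()
--     sb = sorted(B)
--     m = len(sb)
--     ans = 0
--     for a in reversed(A):
--         lo, hi = 0, m
--         while lo < hi:
--             mid = (lo + hi) // 2
--             if sb[mid] <= a:
--                 lo = mid + 1
--             else:
--                 hi = mid
--         ans = min(m - lo, 1 + ans)
--     return ans
-- ===== Notes on version B (the rewrite author's own statement) =====
-- stated objective: alternative
-- what changed: Replaces the greedy consumption of B (heapify + repeated heappop until a beating element is found) by the Hall-defect closed form: answer = min(n, min_i (i + #{b in B : b > sortedA[i]})), computed as a backward min-fold over sorted A with each count obtained by a hand-rolled binary search on sorted(B), which is never consumed.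
import Mathlib
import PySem

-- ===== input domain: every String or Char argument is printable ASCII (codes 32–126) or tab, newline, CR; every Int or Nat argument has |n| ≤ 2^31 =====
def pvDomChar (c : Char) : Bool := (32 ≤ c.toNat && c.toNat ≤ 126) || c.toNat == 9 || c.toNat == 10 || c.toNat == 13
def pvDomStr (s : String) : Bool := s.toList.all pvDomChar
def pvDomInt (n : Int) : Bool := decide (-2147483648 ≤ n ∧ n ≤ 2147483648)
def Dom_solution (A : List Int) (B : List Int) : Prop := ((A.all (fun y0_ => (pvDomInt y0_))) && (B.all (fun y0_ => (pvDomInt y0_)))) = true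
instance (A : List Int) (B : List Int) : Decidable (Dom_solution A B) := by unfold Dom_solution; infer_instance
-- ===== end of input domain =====

-- B computes the same count by the Hall-defect formula min(n, min_i (i + #{b ∈ B : b > sortedA[i]}))
-- as a backward min-fold, instead of greedily consuming B; side effects differ (A heapifies and
-- partially empties B, B leaves B untouched; both sort A in place) — the claim is about the RETURN value.

-- ===== PORT A =====
-- inner 'while B:' loop: heappop returns the (first) minimum of the heap and removes it
def solInner (a : Int) (h : List Int) (ans : Int) : Int × List Int :=
  match hm : PySem.List.min? h (fun x => x) with
  | none => (ans, h)
  | some m =>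
    if m > a then (ans + 1, h.erase m)
    else solInner a (h.erase m) ans
termination_by h.length
decreasing_by
  have hmem := PySem.List.min?_mem hm
  have h1 := List.length_erase_of_mem hmem
  have h2 := List.length_pos_of_mem hmem
  omega

-- 'for a in A:' loop over the sorted A, threading the heap and the answer
def solOuter : List Int → List Int → Int → Int
  | [], _, ans => ans
  | a :: as, h, ans =>
    let r := solInner a h ans
    solOuter as r.2 r.1

def solution (A : List Int) (B : List Int) : Int :=
  solOuter (PySem.List.sorted A (fun x => x) false) B 0

-- ===== PORT B =====
-- 'while lo < hi: mid = (lo+hi)//2; if sb[mid] <= a: lo = mid+1 else: hi = mid'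
-- sb[mid] always has 0 <= mid < len(sb), so getD is exact there
def bisectLoop (sb : List Int) (a : Int) (lo hi : Nat) : Nat :=
  if lo < hi then
    let mid := (lo + hi) / 2
    if sb.getD mid 0 ≤ a then bisectLoop sb a (mid + 1) hi
    else bisectLoop sb a lo mid
  else lo
termination_by hi - lo
decreasing_by all_goals omega

-- 'for a in reversed(A): ...; ans = min(m - lo, 1 + ans)'  (sb = sorted(B), m = len(sb))
def solution_alt (A : List Int) (B : List Int) : Int :=
  (PySem.List.sorted A (fun x => x) false).reverse.foldl
    (fun ans a =>
      min ((((PySem.List.sorted B (fun x => x) false).length -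
             bisectLoop (PySem.List.sorted B (fun x => x) false) a 0
               (PySem.List.sorted B (fun x => x) false).length : Nat) : Int))
        (1 + ans)) 0

-- ===== PRECONDITION & SPEC =====
def Spec_solution (A : List Int) (B : List Int) (out : Int) : Prop := out = solution_alt A B
instance (A : List Int) (B : List Int) (out : Int) : Decidable (Spec_solution A B out) := by unfold Spec_solution; infer_instance

-- ===== CLAIM (what is proved, stated in full; the proofs are below) =====
def Claim_equal_solution : Prop := ∀ (A : List Int) (B : List Int), Dom_solution A B → Spec_solution A B (solution A B)

-- ===== LEMMAS AND PROOFS =====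

-- #{b ∈ bs : b > a}, as an Int
def cntB (bs : List Int) (a : Int) : Int := ((bs.countP (fun b => a < b) : Nat) : Int)

-- the Hall-defect minimum as a structural recursion on (sorted) as
def Phelp : List Int → List Int → Int
  | [], _ => 0
  | a :: as, bs => min (cntB bs a) (1 + Phelp as bs)

-- proof-side two-pointer intermediate: the heap state of A corresponds to a suffix of sorted B
def altOuter : List Int → List Int → Int → Int
  | [], _, ans => ans
  | a :: as, bs, ans =>
    match bs.dropWhile (fun b => decide (b ≤ a)) with
    | [] => altOuter as [] ans
    | _ :: rest => altOuter as rest (ans + 1)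

-- ---- step 1: A's heap loop equals the two-pointer loop on sorted B (as in the heap invariant) ----

lemma sorted_cons_of_min (h : List Int) (m : Int)
    (hm : PySem.List.min? h (fun x => x) = some m) :
    ∃ t, PySem.List.sorted h (fun x => x) false = m :: t ∧
         PySem.List.sorted (h.erase m) (fun x => x) false = t := by
  have hmem : m ∈ h := PySem.List.min?_mem hm
  have hne : h ≠ [] := by rintro rfl; simp at hmem
  obtain ⟨x, t, hxt⟩ : ∃ x t, PySem.List.sorted h (fun x => x) false = x :: t := by
    cases hs : PySem.List.sorted h (fun x => x) false with
    | nil => exact absurd ((PySem.List.sorted_eq_nil_iff h _ _).mp hs) hne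
    | cons x t => exact ⟨x, t, rfl⟩
  have hxm : x = m := by
    have h1 : x ≤ m := PySem.List.key_head_sorted_le h (fun x => x) hxt m hmem
    have hxmem : x ∈ h := by
      have : x ∈ PySem.List.sorted h (fun x => x) false := by rw [hxt]; simp
      exact (PySem.List.mem_sorted h (fun y => y) false x).mp this
    have h2 : m ≤ x := PySem.List.min?_isMin hm x hxmem
    omega
  subst hxm
  refine ⟨t, hxt, ?_⟩
  have hperm : (PySem.List.sorted h (fun x => x) false).Perm h := PySem.List.sorted_perm h _ _
  have hperm2 : t.Perm (h.erase x) := by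
    have := (List.Perm.erase x hperm)
    rw [hxt] at this
    simpa using this
  have hpw : t.Pairwise (fun a b => a ≤ b) := by
    have := PySem.List.sorted_pairwise h (fun x => x)
    rw [hxt] at this
    exact (List.pairwise_cons.mp this).2
  exact PySem.List.sorted_id_eq_of_perm_of_pairwise _ t hperm2 hpw

lemma solInner_nil (a : Int) (ans : Int) : solInner a [] ans = (ans, []) := by
  rw [solInner.eq_def]; rfl

lemma solInner_step (a : Int) (h : List Int) (ans : Int) (m : Int)
    (hm : PySem.List.min? h (fun x => x) = some m) :
    solInner a h ans = if a < m then (ans + 1, h.erase m) else solInner a (h.erase m) ans := by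
  rw [solInner.eq_def]
  split
  · next hm' => rw [hm'] at hm; cases hm
  · next m' hm' => rw [hm'] at hm; injection hm with e; subst e; rfl

lemma solInner_eq (a : Int) : ∀ n (h : List Int), h.length ≤ n → ∀ ans,
    (solInner a h ans).1 =
      (match (PySem.List.sorted h (fun x => x) false).dropWhile (fun b => decide (b ≤ a)) with
       | [] => ans | _ :: _ => ans + 1) ∧
    PySem.List.sorted (solInner a h ans).2 (fun x => x) false =
      ((PySem.List.sorted h (fun x => x) false).dropWhile (fun b => decide (b ≤ a))).tail := by
  intro n
  induction n with
  | zero =>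
    intro h hlen ans
    have : h = [] := List.length_eq_zero_iff.mp (Nat.le_zero.mp hlen)
    subst this
    simp [solInner_nil, PySem.List.sorted]
  | succ n ih =>
    intro h hlen ans
    cases hm : PySem.List.min? h (fun x => x) with
    | none =>
      have : h = [] := (PySem.List.min?_eq_none_iff h _).mp hm
      subst this
      simp [solInner_nil, PySem.List.sorted, List.foldl]
    | some m =>
      obtain ⟨t, hst, hst'⟩ := sorted_cons_of_min h m hm
      have hlen' : (h.erase m).length ≤ n := by
        have := List.length_erase_of_mem (PySem.List.min?_mem hm)
        have hne := List.length_pos_of_mem (PySem.List.min?_mem hm)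
        omega
      by_cases hma : m > a
      · have hx : solInner a h ans = (ans + 1, h.erase m) := by
          rw [solInner_step a h ans m hm]; simp [hma]
        rw [hx, hst]
        have : decide (m ≤ a) = false := by simp; omega
        simp [List.dropWhile, this, hst']
      · have hstep : solInner a h ans = solInner a (h.erase m) ans := by
          rw [solInner_step a h ans m hm]; simp [hma]
        have hma' : decide (m ≤ a) = true := by simp; omega
        rw [hstep, hst]
        simp only [List.dropWhile, hma']
        rw [← hst']
        exact ih (h.erase m) hlen' ans

lemma solOuter_eq : ∀ (as h : List Int) (ans : Int),
    solOuter as h ans = altOuter as (PySem.List.sorted h (fun x => x) false) ans := by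
  intro as
  induction as with
  | nil => intro h ans; simp [solOuter, altOuter]
  | cons a as ih =>
    intro h ans
    obtain ⟨h1, h2⟩ := solInner_eq a h.length h (le_refl _) ans
    simp only [solOuter, altOuter]
    cases hd : (PySem.List.sorted h (fun x => x) false).dropWhile (fun b => decide (b ≤ a)) with
    | nil =>
      rw [hd] at h1 h2
      simp at h1 h2
      rw [ih, h2, h1]
    | cons x rest =>
      rw [hd] at h1 h2
      simp at h1 h2
      rw [ih, h2, h1]

-- ---- step 2: the two-pointer loop computes the Hall-defect minimum ----

lemma cntB_nonneg (bs : List Int) (a : Int) : 0 ≤ cntB bs a := by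
  simp [cntB]

lemma cntB_le_length (bs : List Int) (a : Int) : cntB bs a ≤ (bs.length : Int) := by
  have := List.countP_le_length (l := bs) (p := fun b => decide (a < b))
  simp [cntB]
  omega

lemma Phelp_nonneg : ∀ (as bs : List Int), 0 ≤ Phelp as bs := by
  intro as
  induction as with
  | nil => intro bs; simp [Phelp]
  | cons a t ih =>
    intro bs
    have := cntB_nonneg bs a
    have := ih bs
    simp only [Phelp, le_min_iff]
    omega

lemma cntB_all_gt (bs : List Int) (x : Int) (h : ∀ b ∈ bs, x < b) :
    cntB bs x = (bs.length : Int) := by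
  unfold cntB
  rw [List.countP_eq_length.mpr]
  intro b hb
  simpa using h b hb

lemma cntB_append (bs cs : List Int) (x : Int) :
    cntB (bs ++ cs) x = cntB bs x + cntB cs x := by
  simp [cntB, List.countP_append]

lemma cntB_all_le (bs : List Int) (a x : Int) (hax : a ≤ x) (h : ∀ b ∈ bs, b ≤ a) :
    cntB bs x = 0 := by
  unfold cntB
  rw [List.countP_eq_zero.mpr]
  · simp
  · intro b hb
    have := h b hb
    simp; omega

-- sublemma S: dropping a prefix of b-values that beat nobody relevant, with the matched
-- minimum b removed, shifts the defect minimum by exactly the capacity of rest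
lemma Phelp_drop : ∀ (as' : List Int) (a b : Int) (pre rest : List Int),
    (∀ x ∈ pre, x ≤ a) → a < b → rest.Pairwise (fun u v => u ≤ v) → (∀ x ∈ rest, b ≤ x) →
    (∀ x ∈ as', a ≤ x) →
    min ((rest.length : Int)) (Phelp as' (pre ++ b :: rest)) = Phelp as' rest := by
  intro as'
  induction as' with
  | nil =>
    intro a b pre rest hpre hab hpw hrest hmem
    simp [Phelp]
  | cons x t ih =>
    intro a b pre rest hpre hab hpw hrest hmem
    have hax : a ≤ x := hmem x (by simp)
    have hcnt : cntB (pre ++ b :: rest) x = cntB (b :: rest) x := by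
      rw [cntB_append, cntB_all_le pre a x hax hpre]; omega
    have hcons : cntB (b :: rest) x = (if x < b then 1 else 0) + cntB rest x := by
      unfold cntB
      by_cases hxb : x < b
      · simp [hxb]; omega
      · simp [hxb]
    have hIH := ih a b pre rest hpre hab hpw hrest (fun y hy => hmem y (by simp [hy]))
    have hle := cntB_le_length rest x
    have hnn := cntB_nonneg rest x
    have hPnn := Phelp_nonneg t (pre ++ b :: rest)
    have hPnn' := Phelp_nonneg t rest
    by_cases hxb : x < b
    · -- b beats x, so everything in rest beats x: cnt rest x = |rest|
      have hall : cntB rest x = (rest.length : Int) := by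
        apply cntB_all_gt
        intro y hy
        have := hrest y hy
        omega
      simp only [Phelp, hcnt, hcons, if_pos hxb]
      omega
    · simp only [Phelp, hcnt, hcons, if_neg hxb]
      omega

lemma altOuter_nil_heap : ∀ (as : List Int) (ans : Int), altOuter as [] ans = ans := by
  intro as
  induction as with
  | nil => intro ans; simp [altOuter]
  | cons a t ih => intro ans; simpa [altOuter] using ih ans

lemma altOuter_eq_Phelp : ∀ (as bs : List Int) (ans : Int),
    as.Pairwise (fun u v => u ≤ v) → bs.Pairwise (fun u v => u ≤ v) →
    altOuter as bs ans = ans + Phelp as bs := by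
  intro as
  induction as with
  | nil => intro bs ans _ _; simp [altOuter, Phelp]
  | cons a t ih =>
    intro bs ans hA hB
    obtain ⟨haT, hTpw⟩ := List.pairwise_cons.mp hA
    have hsplit : bs.takeWhile (fun b => decide (b ≤ a)) ++ bs.dropWhile (fun b => decide (b ≤ a)) = bs :=
      List.takeWhile_append_dropWhile
    cases hd : bs.dropWhile (fun b => decide (b ≤ a)) with
    | nil =>
      -- every b ∈ bs satisfies b ≤ a, so cntB bs a = 0 and the defect minimum is 0
      have hall : ∀ b ∈ bs, b ≤ a := by
        intro b hb
        rw [hd] at hsplit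
        have hb' : b ∈ bs.takeWhile (fun b => decide (b ≤ a)) := by
          rw [← hsplit] at hb; simpa using hb
        have := List.mem_takeWhile_imp hb'
        simpa using this
      have hz : cntB bs a = 0 := cntB_all_le bs a a (le_refl a) hall
      have hPnn := Phelp_nonneg t bs
      simp only [altOuter, hd, altOuter_nil_heap]
      simp only [Phelp, hz]
      omega
    | cons b rest =>
      have hpre : ∀ x ∈ bs.takeWhile (fun b => decide (b ≤ a)), x ≤ a := by
        intro x hx
        have := List.mem_takeWhile_imp hx
        simpa using this
      have hab : a < b := by
        have := List.head?_dropWhile_not (p := fun b => decide (b ≤ a)) (l := bs)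
        rw [hd] at this
        simp at this
        omega
      have hbs_eq : bs = bs.takeWhile (fun b => decide (b ≤ a)) ++ b :: rest := by
        rw [← hd, hsplit]
      have hsub : (b :: rest).Sublist bs := by
        rw [← hd]; exact List.dropWhile_sublist _
      have hpwbr : (b :: rest).Pairwise (fun u v => u ≤ v) := hB.sublist hsub
      obtain ⟨hbrest, hrestpw⟩ := List.pairwise_cons.mp hpwbr
      have hS := Phelp_drop t a b (bs.takeWhile (fun b => decide (b ≤ a))) rest hpre hab hrestpw hbrest haT
      rw [← hbs_eq] at hS
      have hcnt : cntB bs a = 1 + (rest.length : Int) := by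
        have h1 : cntB bs a = cntB (b :: rest) a := by
          rw [hbs_eq, cntB_append, cntB_all_le _ a a (le_refl a) hpre]; omega
        have h2 : cntB (b :: rest) a = (rest.length : Int) + 1 := by
          rw [cntB_all_gt]
          · simp
          · intro y hy
            simp at hy
            rcases hy with rfl | hy
            · exact hab
            · have := hbrest y hy; omega
        omega
      have hIH := ih rest (ans + 1) hTpw hrestpw
      simp only [altOuter, hd, hIH]
      simp only [Phelp, hcnt]
      omega

-- ---- step 3: the binary search computes cntB, and the backward min-fold is Phelp ----

lemma sorted_getD_mono (l : List Int) (hpw : l.Pairwise (fun u v => u ≤ v))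
    (i j : Nat) (hij : i ≤ j) (hj : j < l.length) : l.getD i 0 ≤ l.getD j 0 := by
  rcases Nat.eq_or_lt_of_le hij with rfl | h
  · exact le_refl _
  · rw [List.getD_eq_getElem l 0 (by omega), List.getD_eq_getElem l 0 hj]
    exact List.pairwise_iff_getElem.mp hpw i j (by omega) hj h

lemma bisect_inv (sb : List Int) (a : Int) (hpw : sb.Pairwise (fun u v => u ≤ v)) :
    ∀ (fuel lo hi : Nat), hi - lo ≤ fuel → lo ≤ hi → hi ≤ sb.length →
    (∀ i, i < lo → sb.getD i 0 ≤ a) → (∀ i, hi ≤ i → i < sb.length → a < sb.getD i 0) →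
    bisectLoop sb a lo hi ≤ sb.length ∧
    (∀ i, i < bisectLoop sb a lo hi → sb.getD i 0 ≤ a) ∧
    (∀ i, bisectLoop sb a lo hi ≤ i → i < sb.length → a < sb.getD i 0) := by
  intro fuel
  induction fuel with
  | zero =>
    intro lo hi hfuel hlh hhm hlow hhigh
    have : lo = hi := by omega
    subst this
    rw [bisectLoop, if_neg (by omega)]
    exact ⟨by omega, hlow, hhigh⟩
  | succ n ih =>
    intro lo hi hfuel hlh hhm hlow hhigh
    by_cases hlt : lo < hi
    · rw [bisectLoop, if_pos hlt]
      by_cases hmid : sb.getD ((lo + hi) / 2) 0 ≤ a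
      · simp only [hmid, if_pos]
        apply ih ((lo + hi) / 2 + 1) hi (by omega) (by omega) hhm
        · intro i hi'
          calc sb.getD i 0 ≤ sb.getD ((lo + hi) / 2) 0 :=
                sorted_getD_mono sb hpw i _ (by omega) (by omega)
            _ ≤ a := hmid
        · exact hhigh
      · simp only [hmid, if_false]
        apply ih lo ((lo + hi) / 2) (by omega) (by omega) (by omega) hlow
        intro i hi1 hi2
        calc a < sb.getD ((lo + hi) / 2) 0 := by omega
          _ ≤ sb.getD i 0 := sorted_getD_mono sb hpw _ i hi1 hi2
    · rw [bisectLoop, if_neg hlt]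
      have : lo = hi := by omega
      subst this
      exact ⟨by omega, hlow, hhigh⟩

-- a list split at index r into a (≤ a)-prefix and a (> a)-suffix has countP (> a) = length - r
lemma countP_from_split : ∀ (l : List Int) (a : Int) (r : Nat), r ≤ l.length →
    (∀ i, i < r → l.getD i 0 ≤ a) → (∀ i, r ≤ i → i < l.length → a < l.getD i 0) →
    l.countP (fun b => a < b) = l.length - r := by
  intro l
  induction l with
  | nil => intro a r hr _ _; simp at hr; simp [hr]
  | cons x t ih =>
    intro a r hr hlow hhigh
    cases r with
    | zero =>
      rw [List.countP_eq_length.mpr]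
      · simp
      · intro b hb
        obtain ⟨i, hi, rfl⟩ := List.mem_iff_getElem.mp hb
        have := hhigh i (by omega) hi
        rw [List.getD_eq_getElem _ 0 hi] at this
        simpa using this
    | succ s =>
      have hx : x ≤ a := by simpa using hlow 0 (by omega)
      have hcnt : (x :: t).countP (fun b => a < b) = t.countP (fun b => a < b) := by
        simp [List.countP_cons]
        omega
      have ht := ih a s (by simp at hr; omega)
        (fun i hi => by simpa using hlow (i + 1) (by omega))
        (fun i h1 h2 => by simpa using hhigh (i + 1) (by omega) (by simp; omega))
      simp [hcnt, ht]

lemma bisect_cnt (sb : List Int) (a : Int) (hpw : sb.Pairwise (fun u v => u ≤ v)) :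
    ((sb.length - bisectLoop sb a 0 sb.length : Nat) : Int) = cntB sb a := by
  obtain ⟨h1, h2, h3⟩ := bisect_inv sb a hpw sb.length 0 sb.length (by omega) (by omega)
    (le_refl _) (by omega) (by omega)
  have := countP_from_split sb a (bisectLoop sb a 0 sb.length) h1 h2 h3
  unfold cntB
  omega

lemma foldl_reverse_Phelp (bs : List Int) (hpw : bs.Pairwise (fun u v => u ≤ v)) :
    ∀ (as : List Int),
    as.reverse.foldl
      (fun ans a => min (((bs.length - bisectLoop bs a 0 bs.length : Nat) : Int)) (1 + ans)) 0
      = Phelp as bs := by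
  intro as
  rw [List.foldl_reverse]
  induction as with
  | nil => simp [Phelp]
  | cons a t ih => simp [Phelp, List.foldr_cons, ih, bisect_cnt bs a hpw]

-- ===== VERDICT (by name: the statement is the Claim_ definition above) =====
theorem solution_spec : Claim_equal_solution := by
  intro A B _
  show solution A B = solution_alt A B
  unfold solution solution_alt
  rw [solOuter_eq,
      foldl_reverse_Phelp _ (PySem.List.sorted_pairwise B (fun x => x)),
      altOuter_eq_Phelp _ _ 0 (PySem.List.sorted_pairwise A (fun x => x))
        (PySem.List.sorted_pairwise B (fun x => x))]
  omega
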